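-- pv_equiv track=rewrite | github.com/thierryxdp/TCC | problems/816/solution_277862.py | maiores
-- ===== SOURCE A (Python) =====
-- def maiores(lista,n):
--     #Dada uma lista de números inteiros e um número inteiro, retorna nova lista com números maiores que o fornecido. list, int -> list
--     list.extend(lista,[n])
--     list.sort(lista)
--     nova_lista = list()
--     for i in lista:
--         if i > n:
--             list.extend(nova_lista,[i])
--     return(nova_lista)
-- ===== SOURCE B (Python) =====
-- def maiores(lista, n):
--     # Same in-place mutation as A (append n, sort), then find the boundary of
--     # the strictly-greater tail by binary search and return it as one slice.
--     lista.append(n)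
--     lista.sort()
--     lo, hi = 0, len(lista)
--     while lo < hi:
--         mid = (lo + hi) // 2
--         if lista[mid] <= n:
--             lo = mid + 1
--         else:
--             hi = mid
--     return lista[lo:]
-- ===== Notes on version B (the rewrite author's own statement) =====
-- stated objective: alternative
-- what changed: Instead of a linear pass collecting each element > n into a new list, B binary-searches the sorted list for the first element > n and returns the tail slice from that boundary; the in-place append+sort mutation of lista is preserved.
import Mathlib
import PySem

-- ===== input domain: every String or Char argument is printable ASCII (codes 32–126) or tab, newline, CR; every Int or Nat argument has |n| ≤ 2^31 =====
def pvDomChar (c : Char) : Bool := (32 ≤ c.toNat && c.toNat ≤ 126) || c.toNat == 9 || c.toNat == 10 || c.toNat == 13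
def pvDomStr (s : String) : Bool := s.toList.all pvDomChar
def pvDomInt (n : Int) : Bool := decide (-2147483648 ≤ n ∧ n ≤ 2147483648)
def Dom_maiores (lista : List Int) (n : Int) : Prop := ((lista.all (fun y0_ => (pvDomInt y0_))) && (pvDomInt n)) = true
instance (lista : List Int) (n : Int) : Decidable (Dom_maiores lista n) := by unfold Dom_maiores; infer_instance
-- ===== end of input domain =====

-- B replaces A's linear collect-the-greater pass by a binary search for the boundary plus one
-- tail slice; both mutate the Python argument in place (append n, sort) — the theorem is about
-- the return value.
-- ===== PORT A =====
def maiores (lista : List Int) (n : Int) : List Int :=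
  -- list.extend(lista,[n]); list.sort(lista)
  let lista := PySem.List.sorted (lista ++ [n]) (fun x => x) false
  -- for i in lista: if i > n: list.extend(nova_lista,[i])
  lista.foldl (fun nova_lista i => if i > n then nova_lista ++ [i] else nova_lista) []

-- ===== PORT B =====
-- hand-written bisect_right loop of Source B (while lo < hi: mid=(lo+hi)//2; …), fuel = list length
def bsrLoop (xs : List Int) (x : Int) : Nat → Nat → Nat → Nat
  | 0, lo, _ => lo
  | fuel + 1, lo, hi =>
    if lo < hi then
      match xs[(lo + hi) / 2]? with
      | some y => if y ≤ x then bsrLoop xs x fuel ((lo + hi) / 2 + 1) hi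
                  else bsrLoop xs x fuel lo ((lo + hi) / 2)
      | none => lo
    else lo

def maiores_alt (lista : List Int) (n : Int) : List Int :=
  let lista := PySem.List.sorted (lista ++ [n]) (fun x => x) false
  let lo := bsrLoop lista n lista.length 0 lista.length
  PySem.List.slice lista (some (lo : Int)) none

-- ===== PRECONDITION & SPEC =====
def Spec_maiores (lista : List Int) (n : Int) (out : List Int) : Prop := out = maiores_alt lista n
instance (lista : List Int) (n : Int) (out : List Int) : Decidable (Spec_maiores lista n out) := by unfold Spec_maiores; infer_instance

-- ===== CLAIM (what is proved, stated in full; the proofs are below) =====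
def Claim_equal_maiores : Prop := ∀ (lista : List Int) (n : Int), Dom_maiores lista n → Spec_maiores lista n (maiores lista n)

-- ===== LEMMAS AND PROOFS =====

-- Source B's hand-written loop is exactly the bisect_right loop (its branch tests y ≤ x where
-- PySem's tests x < y).
theorem bsrLoop_eq_bisectRightLoop (xs : List Int) (x : Int) (fuel lo hi : Nat) :
    bsrLoop xs x fuel lo hi = PySem.List.bisectRightLoop xs x fuel lo hi := by
  induction fuel generalizing lo hi with
  | zero => rfl
  | succ fuel ih =>
    simp only [bsrLoop, PySem.List.bisectRightLoop]
    split
    · cases h : xs[(lo + hi) / 2]? with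
      | none => rfl
      | some y =>
        by_cases hle : y ≤ x
        · simp only [if_pos hle, if_neg (not_lt.mpr hle), ih]
        · simp only [if_neg hle, if_pos (not_le.mp hle), ih]
    · rfl

-- if the first k elements fail the predicate and the rest satisfy it, filtering is dropping k
theorem filter_eq_drop_of_split (s : List Int) (n : Int) (k : Nat) (hk : k ≤ s.length)
    (h1 : ∀ (j : Nat) (hj : j < s.length), j < k → s[j] ≤ n)
    (h2 : ∀ (j : Nat) (hj : j < s.length), k ≤ j → n < s[j]) :
    s.filter (fun i => n < i) = s.drop k := by
  conv_lhs => rw [← List.take_append_drop k s]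
  rw [List.filter_append, List.filter_eq_nil_iff.mpr, List.filter_eq_self.mpr, List.nil_append]
  · intro a ha
    rcases List.mem_iff_getElem.mp ha with ⟨j, hj, rfl⟩
    have hkj : k + j < s.length := by simp only [List.length_drop] at hj; omega
    rw [List.getElem_drop]
    exact decide_eq_true (h2 (k + j) hkj (Nat.le_add_right _ _))
  · intro a ha
    rcases List.mem_iff_getElem.mp ha with ⟨j, hj, rfl⟩
    have hjk : j < k := lt_of_lt_of_le hj (by simp)
    have hjs : j < s.length := lt_of_lt_of_le hj (by simp)
    rw [List.getElem_take]
    simpa using not_lt.mpr (h1 j hjs hjk)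

-- ===== VERDICT (by name: the statement is the Claim_ definition above) =====
theorem maiores_spec : Claim_equal_maiores := by
  intro lista n _
  unfold Spec_maiores
  simp only [maiores, maiores_alt]
  set s := PySem.List.sorted (lista ++ [n]) (fun x => x) false with hs
  have hb : bsrLoop s n s.length 0 s.length = PySem.List.bisectRight s n := by
    rw [bsrLoop_eq_bisectRightLoop]; rfl
  have hpw : s.Pairwise (· ≤ ·) := PySem.List.sorted_pairwise (lista ++ [n]) (fun x => x)
  obtain ⟨hk, h1, h2⟩ := PySem.List.bisectRight_spec s n hpw
  rw [hb, PySem.List.slice_from_natCast]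
  have hfold : s.foldl (fun nova_lista i => if i > n then nova_lista ++ [i] else nova_lista) [] =
      s.filter (fun i => n < i) := by
    simpa using PySem.List.foldl_append_if (fun i => decide (n < i)) (fun i => i) s ([] : List Int)
  rw [hfold, filter_eq_drop_of_split s n _ hk h1 h2]
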